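-- pv_equiv track=rewrite | github.com/PranavTupe2000/document-iq | document-iq/document-iq-platform/components/rag-engine/src/document_iq_platform_rag/service.py | build_hierarchical_context
-- ===== SOURCE A (Python) =====
-- def build_hierarchical_context(layout_json):
--
--     blocks = layout_json.get("blocks", [])
--     qa_pairs = layout_json.get("qa_pairs", [])
--
--     structured_context = []
--     pages = {}
--
--     qa_bboxes = set()
--
--     for pair in qa_pairs:
--         qb = tuple(pair.get("question_bbox", []))
--         ab = tuple(pair.get("answer_bbox", []))
--         if qb:
--             qa_bboxes.add(qb)
--         if ab:
--             qa_bboxes.add(ab)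
--
--     for block in blocks:
--         page = block.get("page", 1)
--         pages.setdefault(page, []).append(block)
--
--     for page_num in sorted(pages.keys()):
--         structured_context.append(f"\n=== Page {page_num} ===\n")
--
--         page_blocks = pages[page_num]
--
--         for block in sorted(page_blocks, key=lambda x: x.get("position", 0)):
--
--             bbox_tuple = tuple(block.get("bbox", []))
--             if bbox_tuple in qa_bboxes:
--                 continue
--
--             text = block.get("text", "").strip()
--             if not text:
--                 continue
--
--             block_type = block.get("type", "other")
--
--             if block_type == "header":
--                 structured_context.append(f"[HEADER] {text}")
--             elif block_type == "table":
--                 structured_context.append(f"[TABLE] {text}")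
--             else:
--                 structured_context.append(text)
--
--     return "\n".join(structured_context)
-- ===== SOURCE B (Python) =====
-- def build_hierarchical_context(layout_json):
--     blocks = layout_json.get("blocks", [])
--
--     qa_bboxes = {t for pair in layout_json.get("qa_pairs", [])
--                  for t in (tuple(pair.get("question_bbox", [])),
--                            tuple(pair.get("answer_bbox", [])))
--                  if t}
--
--     def render(b):
--         if tuple(b.get("bbox", [])) in qa_bboxes:
--             return None
--         text = b.get("text", "").strip()
--         if not text:
--             return None
--         t = b.get("type", "other")
--         if t == "header":
--             return f"[HEADER] {text}"
--         if t == "table":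
--             return f"[TABLE] {text}"
--         return text
--
--     parts = []
--     for page in sorted({b.get("page", 1) for b in blocks}):
--         parts.append(f"\n=== Page {page} ===\n")
--         group = [b for b in blocks if b.get("page", 1) == page]
--         parts.extend(line for line in
--                      (render(b) for b in sorted(group, key=lambda x: x.get("position", 0)))
--                      if line is not None)
--     return "\n".join(parts)
-- ===== Notes on version B (the rewrite author's own statement) =====
-- stated objective: simpler
-- what changed: A's one-pass grouping into a page-keyed dict of block lists (setdefault/append, then sorted keys and a nested append loop with continues) is replaced by computing the distinct page set once, sorting it, and filtering the block list per page, with the per-block filter-and-format logic factored into an Option-returning render helper consumed as a filtered generator.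
import Mathlib
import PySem

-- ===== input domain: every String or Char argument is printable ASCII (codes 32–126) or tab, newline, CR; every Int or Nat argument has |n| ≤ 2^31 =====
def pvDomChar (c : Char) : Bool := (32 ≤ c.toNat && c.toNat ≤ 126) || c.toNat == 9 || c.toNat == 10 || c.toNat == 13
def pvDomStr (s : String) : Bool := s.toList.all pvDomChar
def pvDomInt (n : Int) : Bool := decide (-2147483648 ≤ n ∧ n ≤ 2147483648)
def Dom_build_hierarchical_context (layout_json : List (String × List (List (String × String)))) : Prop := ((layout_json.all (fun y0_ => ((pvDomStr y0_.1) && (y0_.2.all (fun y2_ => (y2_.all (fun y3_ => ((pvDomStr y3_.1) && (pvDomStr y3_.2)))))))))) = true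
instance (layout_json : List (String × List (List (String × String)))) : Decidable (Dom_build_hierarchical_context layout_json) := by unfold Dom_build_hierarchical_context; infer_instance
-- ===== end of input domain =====

-- B replaces A's page-keyed dict of block lists by computing the distinct page set once and
-- filtering the block list per page, rendering blocks through an Option-returning helper (objective: simpler).

-- ===== PORT A =====
-- Blocks are dicts str→str here, so a block's "page"/"position" values are strings when present
-- and the Python defaults 1 / 0 are ints: a page value is modelled as Option String (none = absent
-- = Python's default 1).  Python's sorted() on such mixed int/str values raises TypeError — those
-- inputs are excluded by Pre_ below — so the sort key `fun p => p.getD "1"` (and `.getD ""` for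
-- positions) is exact on every admitted input: there either all values are strings or all are the
-- (equal) defaults.  tuple(bbox-string) membership in the qa-bbox set is modelled on the strings
-- themselves (exact: tuples of chars are equal iff the strings are, and empty values are never added).
def build_hierarchical_context (layout_json : List (String × List (List (String × String)))) : String :=
  let blocks : List (List (String × String)) := (PySem.Dict.mk layout_json).getD "blocks" []
  let qa_pairs : List (List (String × String)) := (PySem.Dict.mk layout_json).getD "qa_pairs" []
  let qa_bboxes : PySem.Set String :=
    qa_pairs.foldl (fun s pair =>
      let qb := (PySem.Dict.mk pair).getD "question_bbox" ""
      let ab := (PySem.Dict.mk pair).getD "answer_bbox" ""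
      let s := if qb ≠ "" then PySem.Set.add s qb else s
      if ab ≠ "" then PySem.Set.add s ab else s) PySem.Set.empty
  let pages : PySem.Dict (Option String) (List (List (String × String))) :=
    blocks.foldl (fun d block => d.modify ((PySem.Dict.mk block).get? "page") [] (fun l => l ++ [block])) PySem.Dict.empty
  let structured_context : List String :=
    (PySem.List.sorted pages.keys (fun p => p.getD "1")).foldl (fun acc page_num =>
      let acc := acc ++ ["\n=== Page " ++ page_num.getD "1" ++ " ===\n"]
      let page_blocks := pages.getD page_num []
      (PySem.List.sorted page_blocks (fun b => ((PySem.Dict.mk b).get? "position").getD "")).foldl (fun acc block =>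
        let bbox := (PySem.Dict.mk block).getD "bbox" ""
        if PySem.Set.contains qa_bboxes bbox then acc
        else
          let text := PySem.Str.strip ((PySem.Dict.mk block).getD "text" "")
          if text = "" then acc
          else
            let btype := (PySem.Dict.mk block).getD "type" "other"
            if btype = "header" then acc ++ ["[HEADER] " ++ text]
            else if btype = "table" then acc ++ ["[TABLE] " ++ text]
            else acc ++ [text]) acc) []
  PySem.Str.join "\n" structured_context

-- ===== PORT B =====
def pvRender (qa_bboxes : PySem.Set String) (b : List (String × String)) : Option String :=
  if PySem.Set.contains qa_bboxes ((PySem.Dict.mk b).getD "bbox" "") then none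
  else
    let text := PySem.Str.strip ((PySem.Dict.mk b).getD "text" "")
    if text = "" then none
    else
      let t := (PySem.Dict.mk b).getD "type" "other"
      if t = "header" then some ("[HEADER] " ++ text)
      else if t = "table" then some ("[TABLE] " ++ text)
      else some text

def build_hierarchical_context_alt (layout_json : List (String × List (List (String × String)))) : String :=
  let blocks : List (List (String × String)) := (PySem.Dict.mk layout_json).getD "blocks" []
  let qa_pairs : List (List (String × String)) := (PySem.Dict.mk layout_json).getD "qa_pairs" []
  let qa_bboxes : PySem.Set String :=
    PySem.Set.ofList (qa_pairs.flatMap (fun pair =>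
      [(PySem.Dict.mk pair).getD "question_bbox" "",
       (PySem.Dict.mk pair).getD "answer_bbox" ""].filter (fun t => !(t == ""))))
  let parts : List String :=
    (PySem.List.sorted (PySem.Set.ofList (blocks.map (fun b => (PySem.Dict.mk b).get? "page")))
        (fun p => p.getD "1")).foldl (fun parts page =>
      let group := blocks.filter (fun b => (PySem.Dict.mk b).get? "page" == page)
      (parts ++ ["\n=== Page " ++ page.getD "1" ++ " ===\n"]) ++
        (PySem.List.sorted group (fun b => ((PySem.Dict.mk b).get? "position").getD "")).filterMap (pvRender qa_bboxes)) []
  PySem.Str.join "\n" parts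

-- ===== PRECONDITION & SPEC =====
-- Pre_ excludes exactly the inputs on which Python A raises TypeError: sorting mixes a block's
-- string "page" value with the int default 1 (some blocks have "page" and some don't), or, within
-- one page group of ≥ 2 blocks, a string "position" value with the int default 0.
def Pre_build_hierarchical_context (layout_json : List (String × List (List (String × String)))) : Prop :=
  let blocks := (PySem.Dict.mk layout_json).getD "blocks" []
  ((∀ b ∈ blocks, ((PySem.Dict.mk b).get? "page").isSome) ∨
   (∀ b ∈ blocks, (PySem.Dict.mk b).get? "page" = none)) ∧
  ∀ b0 ∈ blocks,
    (let g := blocks.filter (fun b => (PySem.Dict.mk b).get? "page" == (PySem.Dict.mk b0).get? "page")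
     g.length ≤ 1 ∨ (∀ b ∈ g, ((PySem.Dict.mk b).get? "position").isSome) ∨
       (∀ b ∈ g, (PySem.Dict.mk b).get? "position" = none))
instance (layout_json : List (String × List (List (String × String)))) : Decidable (Pre_build_hierarchical_context layout_json) := by unfold Pre_build_hierarchical_context; infer_instance

def pvWitness_build_hierarchical_context : (List (String × List (List (String × String)))) :=
  [("blocks", [[("page", "1"), ("text", "hello"), ("position", "2")],
               [("page", "1"), ("text", " T "), ("type", "header"), ("position", "1")]]),
   ("qa_pairs", [[("question_bbox", "ab")]])]

def Spec_build_hierarchical_context (layout_json : List (String × List (List (String × String)))) (out : String) : Prop := out = build_hierarchical_context_alt layout_json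
instance (layout_json : List (String × List (List (String × String)))) (out : String) : Decidable (Spec_build_hierarchical_context layout_json out) := by unfold Spec_build_hierarchical_context; infer_instance

-- ===== CLAIM (what is proved, stated in full; the proofs are below) =====
def Claim_equal_build_hierarchical_context : Prop := ∀ (layout_json : List (String × List (List (String × String)))), Dom_build_hierarchical_context layout_json → Pre_build_hierarchical_context layout_json → Spec_build_hierarchical_context layout_json (build_hierarchical_context layout_json)

-- ===== LEMMAS AND PROOFS =====


-- ===== LEMMAS AND PROOFS =====
-- the qa-bbox loop of A builds exactly the set of the nonempty bbox strings, in encounter order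
theorem pv_qa_fold_eq (qa_pairs : List (List (String × String))) (s : PySem.Set String) :
    qa_pairs.foldl (fun s pair =>
      let qb := (PySem.Dict.mk pair).getD "question_bbox" ""
      let ab := (PySem.Dict.mk pair).getD "answer_bbox" ""
      let s := if qb ≠ "" then PySem.Set.add s qb else s
      if ab ≠ "" then PySem.Set.add s ab else s) s =
    PySem.Set.update s (qa_pairs.flatMap (fun pair =>
      [(PySem.Dict.mk pair).getD "question_bbox" "",
       (PySem.Dict.mk pair).getD "answer_bbox" ""].filter (fun t => !(t == "")))) := by
  induction qa_pairs generalizing s with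
  | nil => simp [PySem.Set.update_nil]
  | cons pair rest ih =>
    simp only [List.foldl_cons, List.flatMap_cons, PySem.Set.update_append]
    rw [ih]
    congr 1
    by_cases hq : (PySem.Dict.mk pair).getD "question_bbox" "" = "" <;>
      by_cases ha : (PySem.Dict.mk pair).getD "answer_bbox" "" = "" <;>
        simp [hq, ha, PySem.Set.update_cons, PySem.Set.update_nil]

-- the page-keyed dict of A groups: looking a page up yields the blocks with that page, in order
theorem pv_group_eq (blocks : List (List (String × String))) (p : Option String) :
    (blocks.foldl (fun d block => d.modify ((PySem.Dict.mk block).get? "page") [] (fun l => l ++ [block])) PySem.Dict.empty).getD p [] =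
    blocks.filter (fun b => (PySem.Dict.mk b).get? "page" == p) := by
  have h := PySem.Dict.getD_foldl_modify_append
    (l := blocks.map (fun b => ((PySem.Dict.mk b).get? "page", b)))
    (d := (PySem.Dict.empty : PySem.Dict (Option String) (List (List (String × String))))) (c := p)
  rw [List.foldl_map] at h
  simpa [PySem.Dict.getD_empty, List.filter_map, Function.comp_def] using h

-- the keys of that dict are the distinct pages in first-appearance order
theorem pv_keys_eq (blocks : List (List (String × String))) :
    (blocks.foldl (fun d block => d.modify ((PySem.Dict.mk block).get? "page") [] (fun l => l ++ [block])) PySem.Dict.empty).keys =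
    PySem.Set.ofList (blocks.map (fun b => (PySem.Dict.mk b).get? "page")) := by
  rw [PySem.Dict.keys_foldl_modify_key blocks (fun b => (PySem.Dict.mk b).get? "page") []
        (fun _ block => fun l => l ++ [block]) PySem.Dict.empty]
  rw [PySem.Dict.keys_empty]
  exact PySem.Set.update_empty _

-- A's filter-and-format loop body is pvRender
theorem pv_inner_eq (qa : PySem.Set String) (l : List (List (String × String))) (acc : List String) :
    l.foldl (fun acc block =>
        let bbox := (PySem.Dict.mk block).getD "bbox" ""
        if PySem.Set.contains qa bbox then acc
        else
          let text := PySem.Str.strip ((PySem.Dict.mk block).getD "text" "")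
          if text = "" then acc
          else
            let btype := (PySem.Dict.mk block).getD "type" "other"
            if btype = "header" then acc ++ ["[HEADER] " ++ text]
            else if btype = "table" then acc ++ ["[TABLE] " ++ text]
            else acc ++ [text]) acc =
    acc ++ l.filterMap (pvRender qa) := by
  rw [List.filterMap_eq_flatMap_toList, ← PySem.List.foldl_append_eq_flatMap]
  apply PySem.List.foldl_congr_mem
  intro a b _
  simp only [pvRender]
  split_ifs <;> simp

-- ===== VERDICT (by name: the statement is the Claim_ definition above) =====
theorem build_hierarchical_context_spec : Claim_equal_build_hierarchical_context := by
  intro lj _ _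
  unfold Spec_build_hierarchical_context build_hierarchical_context build_hierarchical_context_alt
  dsimp only
  rw [pv_qa_fold_eq, pv_keys_eq, PySem.Set.update_empty]
  congr 1
  apply PySem.List.foldl_congr_mem
  intro acc p _
  dsimp only
  rw [pv_group_eq, pv_inner_eq]
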